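-- pv_equiv track=rewrite | github.com/ttan0091/RA3 | 3.24/evaluation/analyze_cisco.py | get_findings_summary
-- ===== SOURCE A (Python) =====
-- from collections import defaultdict
--
-- def get_findings_summary(result: dict) -> str:
--     """Get severity counts for a result."""
--     counts = defaultdict(int)
--     for f in result.get("findings", []):
--         sev = f.get("severity", "UNKNOWN")
--         if sev != "INFO":
--             counts[sev] += 1
--     if not counts:
--         return "SAFE"
--     return ", ".join(f"{k}:{v}" for k, v in sorted(counts.items()))
-- ===== SOURCE B (Python) =====
-- def get_findings_summary(result: dict) -> str:
--     """Get severity counts for a result."""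
--     sevs = []
--     for f in result.get("findings", []):
--         sev = f.get("severity", "UNKNOWN")
--         if sev != "INFO":
--             sevs.append(sev)
--     if not sevs:
--         return "SAFE"
--     sevs.sort()
--     pieces = []
--     run_key, run_len = sevs[0], 1
--     for s in sevs[1:]:
--         if s == run_key:
--             run_len += 1
--         else:
--             pieces.append(f"{run_key}:{run_len}")
--             run_key, run_len = s, 1
--     pieces.append(f"{run_key}:{run_len}")
--     return ", ".join(pieces)
-- ===== Notes on version B (the rewrite author's own statement) =====
-- stated objective: alternative
-- what changed: Replaces the defaultdict severity counter plus sorted(items) with a flat list of non-INFO severities that is sorted once and then scanned for runs of equal values, emitting each 'k:v' piece from a run length instead of a hash-table count.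
import Mathlib
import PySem

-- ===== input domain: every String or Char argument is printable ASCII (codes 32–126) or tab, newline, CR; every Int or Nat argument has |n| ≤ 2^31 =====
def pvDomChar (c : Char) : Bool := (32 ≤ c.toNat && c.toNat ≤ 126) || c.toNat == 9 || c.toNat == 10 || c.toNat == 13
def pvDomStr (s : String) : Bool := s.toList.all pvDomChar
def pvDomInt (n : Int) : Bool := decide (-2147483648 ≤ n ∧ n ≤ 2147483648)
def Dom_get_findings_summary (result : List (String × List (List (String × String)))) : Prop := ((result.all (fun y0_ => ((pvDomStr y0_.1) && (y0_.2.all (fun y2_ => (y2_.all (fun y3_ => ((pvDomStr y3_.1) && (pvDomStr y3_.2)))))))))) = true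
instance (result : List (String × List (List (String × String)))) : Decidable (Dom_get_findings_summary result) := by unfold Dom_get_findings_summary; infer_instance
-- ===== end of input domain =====

-- B replaces A's defaultdict counter + sorted(items) by collecting the non-INFO severities into a
-- flat list, sorting it once, and scanning runs of equal values (alternative decomposition, same result).

-- ===== PORT A =====
def get_findings_summary (result : List (String × List (List (String × String)))) : String :=
  let counts : PySem.Dict String Int :=
    ((PySem.Dict.mk result).getD "findings" []).foldl
      (fun (counts : PySem.Dict String Int) f =>
        let sev := (PySem.Dict.mk f).getD "severity" "UNKNOWN"
        if sev ≠ "INFO" then counts.modify sev 0 (· + 1) else counts)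
      PySem.Dict.empty
  if counts.items = [] then "SAFE"
  else PySem.Str.join ", "
    ((PySem.List.sorted2 counts.items (fun p => p.1) (fun p => p.2)).map
      (fun p => p.1 ++ ":" ++ PySem.Int.toStr p.2))

-- ===== PORT B =====
def get_findings_summary_alt (result : List (String × List (List (String × String)))) : String :=
  let sevs : List String :=
    ((PySem.Dict.mk result).getD "findings" []).foldl
      (fun acc f =>
        let sev := (PySem.Dict.mk f).getD "severity" "UNKNOWN"
        if sev ≠ "INFO" then acc ++ [sev] else acc)
      []
  if sevs = [] then "SAFE"
  else
    let ss := PySem.List.sorted sevs (fun s => s)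
    let st :=
      (PySem.List.slice ss (some 1) none).foldl
        (fun (st : List String × String × Int) s =>
          if s = st.2.1 then (st.1, st.2.1, st.2.2 + 1)
          else (st.1 ++ [st.2.1 ++ ":" ++ PySem.Int.toStr st.2.2], s, 1))
        ([], PySem.List.pyGetD ss 0 "", 1)
    PySem.Str.join ", " (st.1 ++ [st.2.1 ++ ":" ++ PySem.Int.toStr st.2.2])

-- ===== PRECONDITION & SPEC =====
def Spec_get_findings_summary (result : List (String × List (List (String × String)))) (out : String) : Prop := out = get_findings_summary_alt result
instance (result : List (String × List (List (String × String)))) (out : String) : Decidable (Spec_get_findings_summary result out) := by unfold Spec_get_findings_summary; infer_instance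

-- ===== CLAIM (what is proved, stated in full; the proofs are below) =====
def Claim_equal_get_findings_summary : Prop := ∀ (result : List (String × List (List (String × String)))), Dom_get_findings_summary result → Spec_get_findings_summary result (get_findings_summary result)

-- ===== LEMMAS AND PROOFS =====

-- formatting of one "k:v" piece (proof-side abbreviation for the inlined f-string)
def pvFmt (k : String) (n : Int) : String := k ++ ":" ++ PySem.Int.toStr n

-- recursion form of B's run-scanning loop
def pvRuns : String → Int → List String → List String
  | k, n, [] => [pvFmt k n]
  | k, n, s :: t => if s = k then pvRuns k (n + 1) t else pvFmt k n :: pvRuns s 1 t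

-- a conditional fold over the raw items is the plain fold over the mapped-and-filtered list
theorem pv_foldl_ite {α β γ : Type} (g : α → β) (p : β → Prop) [DecidablePred p]
    (h : γ → β → γ) : ∀ (xs : List α) (d : γ),
    xs.foldl (fun d x => if p (g x) then h d (g x) else d) d
      = ((xs.map g).filter (fun s => decide (p s))).foldl h d := by
  intro xs
  induction xs with
  | nil => intro d; rfl
  | cons x t ih =>
    intro d
    by_cases hp : p (g x) <;> simp [hp, ih]

-- B's fold is pvRuns
theorem pv_foldl_runs : ∀ (M ps : List String) (k : String) (n : Int),
    (let st := M.foldl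
        (fun (st : List String × String × Int) s =>
          if s = st.2.1 then (st.1, st.2.1, st.2.2 + 1)
          else (st.1 ++ [st.2.1 ++ ":" ++ PySem.Int.toStr st.2.2], s, 1))
        (ps, k, n)
     st.1 ++ [st.2.1 ++ ":" ++ PySem.Int.toStr st.2.2]) = ps ++ pvRuns k n M := by
  intro M
  induction M with
  | nil => intro ps k n; simp [pvRuns, pvFmt]
  | cons s t ih =>
    intro ps k n
    by_cases hs : s = k <;> simp [pvRuns, pvFmt, hs, ih]

theorem pv_ofList_sublist {α : Type} [BEq α] [LawfulBEq α] :
    ∀ (xs : List α), (PySem.Set.ofList xs).Sublist xs := by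
  intro xs
  induction xs with
  | nil => simp [PySem.Set.ofList_nil]
  | cons x t ih =>
    rw [PySem.Set.ofList_cons]
    exact List.Sublist.cons₂ x (List.Sublist.trans List.filter_sublist ih)

theorem pv_ofList_filter {α : Type} [BEq α] [LawfulBEq α] (q : α → Bool) :
    ∀ (xs : List α), PySem.Set.ofList (xs.filter q) = (PySem.Set.ofList xs).filter q := by
  intro xs
  induction xs with
  | nil => simp [PySem.Set.ofList_nil]
  | cons x t ih =>
    by_cases hq : q x = true
    · simp only [List.filter_cons, hq, if_pos, PySem.Set.ofList_cons, PySem.Set.discard, ih,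
        List.filter_filter]
      congr 1
      apply List.filter_congr
      intro y _
      exact Bool.and_comm _ _
    · rw [List.filter_cons_of_neg (by simp [hq]), PySem.Set.ofList_cons,
        List.filter_cons_of_neg hq, ih, PySem.Set.discard, List.filter_filter]
      apply List.filter_congr
      intro y _
      by_cases hyx : y = x
      · subst hyx; simp [hq]
      · simp [hyx]

-- the run scan of a ≤-sorted list lists each distinct value once, with its multiplicity
theorem pv_runs_spec : ∀ (M : List String) (k : String) (n : Int),
    M.Pairwise (· ≤ ·) → (∀ x ∈ M, k ≤ x) →
    pvRuns k n M = pvFmt k (n + (M.count k : Int))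
      :: (PySem.Set.ofList (M.filter (fun x => decide (x ≠ k)))).map
           (fun j => pvFmt j ((M.count j : Int))) := by
  intro M
  induction M with
  | nil => intro k n _ _; simp [pvRuns, PySem.Set.ofList_nil]
  | cons s t ih =>
    intro k n hpw hk
    rcases List.pairwise_cons.mp hpw with ⟨hst, hpt⟩
    by_cases hs : s = k
    · subst hs
      rw [pvRuns, if_pos rfl, ih s (n + 1) hpt hst]
      simp only [List.count_cons_self, List.filter_cons]
      simp only [ne_eq, not_true_eq_false, if_neg, decide_false,
        Bool.false_eq_true, not_false_eq_true]
      congr 1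
      · congr 1; push_cast; ring
      · apply List.map_congr_left
        intro j hj
        have hjm := (PySem.Set.mem_ofList _ _).mp hj
        have hjs : j ≠ s := by
          rcases List.mem_filter.mp hjm with ⟨_, h2⟩
          simpa using h2
        simp [hjs.symm]
    · have hks : k < s := lt_of_le_of_ne (hk s (by simp)) (fun h => hs h.symm)
      rw [pvRuns, if_neg hs, ih s 1 hpt hst]
      have hknot : ∀ x ∈ s :: t, k ≠ x := by
        intro x hx
        rcases List.mem_cons.mp hx with h | h
        · subst h; exact ne_of_lt hks
        · exact ne_of_lt (lt_of_lt_of_le hks (hst x h))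
      have hcount0 : (s :: t).count k = 0 := by
        rw [List.count_eq_zero]
        intro hmem
        exact hknot k hmem rfl
      have hfilt : (s :: t).filter (fun x => decide (x ≠ k)) = s :: t := by
        apply List.filter_eq_self.mpr
        intro x hx
        simpa using fun h => hknot x hx h.symm
      rw [hcount0, hfilt, PySem.Set.ofList_cons]
      simp only [List.map_cons, PySem.Set.discard]
      congr 1
      · unfold pvFmt; congr 2; ring
      congr 1
      · unfold pvFmt; congr 2
        simp
        ring
      · rw [← pv_ofList_filter]
        rw [show List.filter (fun y => !y == s) t = List.filter (fun x => decide (x ≠ s)) t from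
          List.filter_congr (fun y _ => by by_cases h : y = s <;> simp [h])]
        apply List.map_congr_left
        intro j hj
        have hjm := (PySem.Set.mem_ofList _ _).mp hj
        have hjs : j ≠ s := by
          rcases List.mem_filter.mp hjm with ⟨_, h2⟩
          simpa using h2
        simp [hjs.symm]

-- insertBy only looks at `before x y` for y in the accumulator
theorem pv_insertBy_congr {α : Type} (b1 b2 : α → α → Bool) (x : α) :
    ∀ (ys : List α), (∀ y ∈ ys, b1 x y = b2 x y) →
    PySem.List.insertBy b1 x ys = PySem.List.insertBy b2 x ys := by
  intro ys
  induction ys with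
  | nil => intro _; rfl
  | cons y t ih =>
    intro h
    show (if b1 x y = true then x :: y :: t else y :: PySem.List.insertBy b1 x t)
       = (if b2 x y = true then x :: y :: t else y :: PySem.List.insertBy b2 x t)
    rw [h y (by simp)]
    by_cases hb : b2 x y = true <;> simp [hb, ih (fun z hz => h z (by simp [hz]))]

theorem pv_foldl_insertBy_congr {α : Type} (b1 b2 : α → α → Bool) (S : List α)
    (hS : ∀ a ∈ S, ∀ b ∈ S, b1 a b = b2 a b) :
    ∀ (xs acc : List α), (∀ x ∈ xs, x ∈ S) → (∀ x ∈ acc, x ∈ S) →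
    xs.foldl (fun acc x => PySem.List.insertBy b1 x acc) acc
      = xs.foldl (fun acc x => PySem.List.insertBy b2 x acc) acc := by
  intro xs
  induction xs with
  | nil => intro acc _ _; rfl
  | cons x t ih =>
    intro acc hxs hacc
    have hx : x ∈ S := hxs x (by simp)
    simp only [List.foldl_cons]
    rw [pv_insertBy_congr b1 b2 x acc (fun y hy => hS x hx y (hacc y hy))]
    exact ih _ (fun z hz => hxs z (by simp [hz]))
      (fun z hz => by
        rcases (PySem.List.insertBy_mem_iff _ _ _ _).mp hz with h | h
        · exact h ▸ hx
        · exact hacc z h)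

-- Python's tuple sort on pairs with pairwise-distinct first components is the first-component sort
theorem pv_sorted2_eq (xs ys : List (String × Int))
    (hperm : ys.Perm xs) (hpw : ys.Pairwise (fun a b => a.1 < b.1)) :
    PySem.List.sorted2 xs (fun p => p.1) (fun p => p.2) = ys := by
  have hne1 : ∀ a ∈ xs, ∀ b ∈ xs, a ≠ b → a.1 ≠ b.1 := by
    intro a ha b hb hab
    have hpw' : List.Pairwise (fun p q : String × Int => p.1 ≠ q.1) ys :=
      hpw.imp (fun h => ne_of_lt h)
    exact List.Pairwise.forall (fun p q h he => h he.symm)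
      hpw' (hperm.mem_iff.mpr ha) (hperm.mem_iff.mpr hb) hab
  have hcong := pv_foldl_insertBy_congr
      (fun a b : String × Int => decide (a.1 < b.1) || (!decide (b.1 < a.1) && decide (a.2 < b.2)))
      (fun a b : String × Int => decide (a.1 < b.1)) xs
      (by
        intro a ha b hb
        by_cases hab : a = b
        · subst hab; simp
        · rcases lt_or_gt_of_ne (hne1 a ha b hb hab) with h | h
          · simp [h]
          · simp [h, asymm h])
      xs [] (fun x hx => hx) (fun x hx => absurd hx (List.not_mem_nil))
  have h1 : PySem.List.sorted2 xs (fun p => p.1) (fun p => p.2)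
      = xs.foldl (fun acc x => PySem.List.insertBy
          (fun a b : String × Int => decide (a.1 < b.1) || (!decide (b.1 < a.1) && decide (a.2 < b.2)))
          x acc) [] := rfl
  have h2 : PySem.List.sorted xs (fun p => p.1)
      = xs.foldl (fun acc x => PySem.List.insertBy
          (fun a b : String × Int => decide (a.1 < b.1)) x acc) [] := rfl
  rw [h1, hcong, ← h2]
  exact PySem.List.sorted_eq_of_perm_of_pairwise_lt xs ys _ hperm hpw

-- Pairwise ≤ plus Nodup gives Pairwise <
theorem pv_pairwise_lt_of_le_nodup (l : List String)
    (hle : l.Pairwise (· ≤ ·)) (hnd : l.Nodup) : l.Pairwise (· < ·) :=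
  (hle.and hnd).imp (fun h => lt_of_le_of_ne h.1 h.2)

-- the sorted distinct keys are the head of the sorted list followed by the deduped rest
theorem pv_sorted_keys (L : List String) (s0 : String) (rest : List String)
    (hss : PySem.List.sorted L (fun s => s) = s0 :: rest) :
    PySem.List.sorted (PySem.Set.ofList L) (fun x => x)
      = s0 :: PySem.Set.ofList (rest.filter (fun x => decide (x ≠ s0))) := by
  have hys : s0 :: PySem.Set.ofList (rest.filter (fun x => decide (x ≠ s0)))
      = PySem.Set.ofList (s0 :: rest) := by
    rw [PySem.Set.ofList_cons, PySem.Set.discard, ← pv_ofList_filter]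
    rw [show List.filter (fun y => !y == s0) rest = List.filter (fun x => decide (x ≠ s0)) rest from
      List.filter_congr (fun y _ => by by_cases h : y = s0 <;> simp [h])]
  rw [hys]
  apply PySem.List.sorted_eq_of_perm_of_pairwise_lt
  · rw [List.perm_ext_iff_of_nodup (PySem.Set.nodup_ofList _) (PySem.Set.nodup_ofList _)]
    intro a
    rw [PySem.Set.mem_ofList, PySem.Set.mem_ofList, ← hss, PySem.List.mem_sorted]
  · apply pv_pairwise_lt_of_le_nodup
    · exact List.Pairwise.sublist (pv_ofList_sublist (s0 :: rest))
        (by rw [← hss]; exact PySem.List.sorted_pairwise L (fun s => s))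
    · exact PySem.Set.nodup_ofList _

-- the crux: counter + sorted items vs sort + run scan, over the flat severity list
theorem pv_main (L : List String) :
    (if (PySem.Dict.counter L).items = [] then "SAFE"
     else PySem.Str.join ", "
       ((PySem.List.sorted2 (PySem.Dict.counter L).items (fun p => p.1) (fun p => p.2)).map
         (fun p => p.1 ++ ":" ++ PySem.Int.toStr p.2)))
    = (if L = [] then "SAFE"
       else
         let ss := PySem.List.sorted L (fun s => s)
         let st :=
           (PySem.List.slice ss (some 1) none).foldl
             (fun (st : List String × String × Int) s =>
               if s = st.2.1 then (st.1, st.2.1, st.2.2 + 1)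
               else (st.1 ++ [st.2.1 ++ ":" ++ PySem.Int.toStr st.2.2], s, 1))
             ([], PySem.List.pyGetD ss 0 "", 1)
         PySem.Str.join ", " (st.1 ++ [st.2.1 ++ ":" ++ PySem.Int.toStr st.2.2])) := by
  rcases hL : L with _ | ⟨a, M⟩
  · rfl
  rw [← hL]
  have hLne : L ≠ [] := by rw [hL]; simp
  have hitems := PySem.Dict.items_counter L
  have hitemsne : (PySem.Dict.counter L).items ≠ [] := by
    rw [hitems, hL, PySem.Set.ofList_cons]
    simp
  rw [if_neg hitemsne, if_neg hLne]
  rcases hss : PySem.List.sorted L (fun s => s) with _ | ⟨s0, rest⟩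
  · exact absurd ((PySem.List.sorted_eq_nil_iff L (fun s => s) false).mp hss) hLne
  -- B side
  simp only [PySem.List.slice_from_one, List.tail_cons, PySem.List.pyGetD_zero_cons]
  rw [pv_foldl_runs rest [] s0 1, List.nil_append]
  have hpw : (s0 :: rest).Pairwise (· ≤ ·) := by
    rw [← hss]; exact PySem.List.sorted_pairwise L (fun s => s)
  rcases List.pairwise_cons.mp hpw with ⟨hs0le, hpwrest⟩
  rw [pv_runs_spec rest s0 1 hpwrest hs0le]
  -- A side
  have hAkeys := pv_sorted_keys L s0 rest hss
  have hsorted2 : PySem.List.sorted2 (PySem.Dict.counter L).items (fun p => p.1) (fun p => p.2)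
      = (PySem.List.sorted (PySem.Set.ofList L) (fun x => x)).map
          (fun k => (k, (L.count k : Int))) := by
    rw [hitems]
    apply pv_sorted2_eq
    · exact (PySem.List.sorted_perm (PySem.Set.ofList L) (fun x => x) false).map _
    · exact (PySem.List.sorted_ofList_pairwise_lt L).map _ (fun a b h => h)
  rw [hsorted2, hAkeys]
  simp only [List.map_cons, List.map_map]
  congr 1
  have hcount : ∀ j : String, L.count j = (s0 :: rest).count j := by
    intro j
    exact (List.Perm.count_eq (by rw [← hss]; exact PySem.List.sorted_perm L (fun s => s) false) j).symm
  congr 1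
  · show pvFmt s0 ((L.count s0 : Int)) = pvFmt s0 (1 + (rest.count s0 : Int))
    rw [hcount s0, List.count_cons_self]
    congr 1
    push_cast; ring
  · apply List.map_congr_left
    intro j hj
    have hjs : j ≠ s0 := by
      rcases List.mem_filter.mp ((PySem.Set.mem_ofList _ _).mp hj) with ⟨_, h2⟩
      simpa using h2
    show pvFmt j ((L.count j : Int)) = pvFmt j ((rest.count j : Int))
    rw [hcount j]
    simp [hjs.symm]

-- ===== VERDICT (by name: the statement is the Claim_ definition above) =====
theorem get_findings_summary_spec : Claim_equal_get_findings_summary := by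
  intro result _
  unfold Spec_get_findings_summary get_findings_summary get_findings_summary_alt
  rw [pv_foldl_ite (fun f => (PySem.Dict.mk f).getD "severity" "UNKNOWN")
      (fun s => s ≠ "INFO") (fun (d : PySem.Dict String Int) s => d.modify s 0 (· + 1))]
  rw [pv_foldl_ite (fun f => (PySem.Dict.mk f).getD "severity" "UNKNOWN")
      (fun s => s ≠ "INFO") (fun (acc : List String) s => acc ++ [s])]
  rw [PySem.List.foldl_append_singleton]
  rw [List.nil_append]
  exact pv_main _
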